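-- pv_equiv track=rewrite | github.com/Yawn-Sean/Daily_CF_Problems | daily_problems/2025/07/0704/personal_submission/cf234g_liryc.py | solve
-- ===== SOURCE A (Python) =====
-- def solve(n: int) -> list[list[int]]:
--     f = 1
--     while f < n:
--         f <<= 1
--     h = f >> 1
--     ans = []
--     while f > 1:
--         r = []
--         for i in range(n):
--             if i % f < h:
--                 r.append(i + 1)
--         ans.append(r)
--         f, h = h, h + 1 >> 1
--     return ans
-- ===== SOURCE B (Python) =====
-- def solve(n: int) -> list[list[int]]:
--     L = (n - 1).bit_length() if n > 1 else 0
--     ans = []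
--     for r in range(L):
--         block = 1 << (L - 1 - r)
--         row = []
--         for s in range(0, n, 2 * block):
--             row.extend(range(s + 1, min(s + block, n) + 1))
--         ans.append(row)
--     return ans
-- ===== Notes on version B (the rewrite author's own statement) =====
-- stated objective: faster
-- what changed: Instead of scanning all of range(n) once per row with a per-element sliding modulo test, B computes the row count L as the bit length of n-1 and builds each row by extending it with one consecutive range of values per aligned block, so no per-element test is performed.
import Mathlib
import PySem

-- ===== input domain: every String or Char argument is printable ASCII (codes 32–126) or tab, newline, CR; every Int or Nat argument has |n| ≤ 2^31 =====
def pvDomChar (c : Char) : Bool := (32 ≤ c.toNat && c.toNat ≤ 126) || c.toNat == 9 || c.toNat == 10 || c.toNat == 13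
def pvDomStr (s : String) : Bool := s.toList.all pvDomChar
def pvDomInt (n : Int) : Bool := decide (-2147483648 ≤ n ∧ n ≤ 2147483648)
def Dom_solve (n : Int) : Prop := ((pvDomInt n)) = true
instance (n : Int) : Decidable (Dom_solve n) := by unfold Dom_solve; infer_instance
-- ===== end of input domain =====

-- B replaces A's per-element modulo test in each row scan by building every row from whole
-- aligned blocks of consecutive values (row count from the bit length of n-1); measurably faster.

-- ===== PORT A =====
-- first while loop of A: f doubles until f ≥ n; fuel 64 suffices on Dom (n ≤ 2^31, f starts at 1)
def growA : Nat → Int → Int → Int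
  | 0, _, f => f
  | fuel + 1, n, f => if f < n then growA fuel n (f <<< (1 : Nat)) else f

-- inner for-loop of A: r = [i+1 for i in range(n) if i % f < h], built by appends
def rowA (n f h : Int) : List Int :=
  (PySem.List.pyRange 0 n 1).foldl
    (fun r i => if PySem.Int.mod i f < h then r ++ [i + 1] else r) []

-- second while loop of A: emit a row, then f, h = h, (h+1) >> 1; fuel 64 suffices on Dom (f ≤ 2^31 halves)
def rowsA : Nat → Int → Int → Int → List (List Int)
  | 0, _, _, _ => []
  | fuel + 1, n, f, h =>
    if 1 < f then rowA n f h :: rowsA fuel n h ((h + 1) >>> (1 : Nat)) else []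

def solve (n : Int) : List (List Int) :=
  let f := growA 64 n 1
  rowsA 64 n f (f >>> (1 : Nat))

-- ===== PORT B =====
def solve_alt (n : Int) : List (List Int) :=
  let L : Nat := if 1 < n then PySem.Int.bitLength (n - 1) else 0
  (List.range L).foldl
    (fun (ans : List (List Int)) (r : Nat) =>
      let block : Int := (1 : Int) <<< (L - 1 - r)
      let row : List Int :=
        (PySem.List.pyRange 0 n (2 * block)).foldl
          (fun (row : List Int) (s : Int) =>
            row ++ PySem.List.pyRange (s + 1) (min (s + block) n + 1) 1)
          []
      ans ++ [row])
    []

-- ===== PRECONDITION & SPEC =====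
def Spec_solve (n : Int) (out : List (List Int)) : Prop := out = solve_alt n
instance (n : Int) (out : List (List Int)) : Decidable (Spec_solve n out) := by unfold Spec_solve; infer_instance

-- ===== CLAIM (what is proved, stated in full; the proofs are below) =====
def Claim_equal_solve : Prop := ∀ (n : Int), Dom_solve n → Spec_solve n (solve n)

-- ===== LEMMAS AND PROOFS =====

-- proof-side names for solve_alt's loops
def Lof (n : Int) : Nat := if 1 < n then PySem.Int.bitLength (n - 1) else 0

def rowOfB (n : Int) (L r : Nat) : List Int :=
  (PySem.List.pyRange 0 n (2 * ((1 : Int) <<< (L - 1 - r)))).foldl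
    (fun row s => row ++ PySem.List.pyRange (s + 1) (min (s + (1 : Int) <<< (L - 1 - r)) n + 1) 1)
    []

lemma solve_alt_eq (n : Int) :
    solve_alt n = (List.range (Lof n)).foldl (fun ans r => ans ++ [rowOfB n (Lof n) r]) [] := rfl

lemma one_shl (e : Nat) : (1 : Int) <<< e = 2 ^ e := by
  rw [Int.shiftLeft_eq]; ring

lemma map_add_one_pyRange (a b : Int) :
    (PySem.List.pyRange a b 1).map (· + 1) = PySem.List.pyRange (a + 1) (b + 1) 1 := by
  rw [PySem.List.pyRange_one a b, PySem.List.pyRange_one (a + 1) (b + 1), List.map_map]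
  have h : b + 1 - (a + 1) = b - a := by ring
  rw [h]
  apply List.map_congr_left
  intro k _
  simp
  ring

-- the fold over block starts builds exactly the filtered list, up to min(step·Q, n)
lemma rowB_blocks (n : Int) (e : Nat) :
    ∀ Q : Nat,
      (List.range Q).foldl
        (fun (row : List Int) (k : Nat) =>
          row ++ PySem.List.pyRange (2 * 2 ^ e * (k : Int) + 1)
            (min (2 * 2 ^ e * (k : Int) + 2 ^ e) n + 1) 1)
        [] =
      ((PySem.List.pyRange 0 (min (2 * 2 ^ e * (Q : Int)) n) 1).filter
          (fun i => decide (PySem.Int.mod i ((2 : Int) ^ (e + 1)) < (2 : Int) ^ e))).map (· + 1) := by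
  have hc : (0 : Int) < 2 ^ e := by positivity
  have hpow : (2 : Int) ^ (e + 1) = 2 * 2 ^ e := by rw [pow_succ]; ring
  intro Q
  induction Q with
  | zero =>
      rw [PySem.List.pyRange_one_eq_nil (by push_cast; omega)]
      simp
  | succ Q ih =>
      rw [List.range_succ, List.foldl_append, List.foldl_cons, List.foldl_nil, ih]
      have hexp : 2 * 2 ^ e * ((Q : Int) + 1) = 2 * 2 ^ e * (Q : Int) + 2 * 2 ^ e := by ring
      push_cast
      rw [hexp]
      set c : Int := 2 ^ e with hcdef
      set s0 : Int := 2 * c * (Q : Int) with hs0def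
      have hs0 : 0 ≤ s0 := by positivity
      by_cases hlt : s0 < n
      · have hm0 : min s0 n = s0 := by omega
        rw [PySem.List.pyRange_one_append 0 s0 (min (s0 + 2 * c) n) (by omega) (by omega)]
        rw [List.filter_append, List.map_append, hm0]
        congr 1
        rw [PySem.List.pyRange_one_append s0 (min (s0 + c) n) (min (s0 + 2 * c) n)
          (by omega) (by omega)]
        rw [List.filter_append]
        have hmod : ∀ i : Int, s0 ≤ i → i < s0 + 2 * c →
            PySem.Int.mod i ((2 : Int) ^ (e + 1)) = i - s0 := by
          intro i h1 h2
          rw [PySem.Int.mod_eq_emod_of_pos (b := (2:Int) ^ (e+1)) (by rw [hpow]; omega), hpow]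
          have hre : i % (2 * c) = (i - s0) % (2 * c) := by
            conv_lhs => rw [show i = (i - s0) + 2 * c * (Q : Int) from by rw [hs0def]; ring]
            rw [Int.add_mul_emod_self_left]
          rw [hre]
          exact Int.emod_eq_of_lt (by omega) (by omega)
        have hf1 : (PySem.List.pyRange s0 (min (s0 + c) n) 1).filter
            (fun i => decide (PySem.Int.mod i ((2 : Int) ^ (e + 1)) < (2 : Int) ^ e)) =
            PySem.List.pyRange s0 (min (s0 + c) n) 1 := by
          apply List.filter_eq_self.mpr
          intro i hi
          have hm := PySem.List.mem_pyRange_one.mp hi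
          rw [hmod i (by omega) (by omega)]
          simp only [decide_eq_true_eq, ← hcdef]
          omega
        have hf2 : (PySem.List.pyRange (min (s0 + c) n) (min (s0 + 2 * c) n) 1).filter
            (fun i => decide (PySem.Int.mod i ((2 : Int) ^ (e + 1)) < (2 : Int) ^ e)) = [] := by
          apply List.filter_eq_nil_iff.mpr
          intro i hi
          have hm := PySem.List.mem_pyRange_one.mp hi
          rw [hmod i (by omega) (by omega)]
          simp only [decide_eq_true_eq, ← hcdef]
          omega
        rw [hf1, hf2, List.append_nil, map_add_one_pyRange]
      · have h1 : min (s0 + 2 * c) n = min s0 n := by omega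
        have h2 : PySem.List.pyRange (s0 + 1) (min (s0 + c) n + 1) 1 = [] :=
          PySem.List.pyRange_one_eq_nil (by omega)
        rw [h1, h2, List.append_nil]

lemma rowOfB_eq (n : Int) (L r : Nat) :
    rowOfB n L r =
      ((PySem.List.pyRange 0 n 1).filter
        (fun i => decide (PySem.Int.mod i ((2 : Int) ^ ((L - 1 - r) + 1)) < (2 : Int) ^ (L - 1 - r)))).map
        (· + 1) := by
  set e := L - 1 - r with hedef
  have hc : (0 : Int) < 2 ^ e := by positivity
  unfold rowOfB
  rw [← hedef, one_shl]
  by_cases hn : 0 < n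
  · rw [PySem.List.pyRange_of_pos 0 n (by positivity), List.foldl_map]
    simp only [zero_add, Int.sub_zero, if_pos (by omega : (0 : Int) < n)]
    rw [rowB_blocks n e]
    have hq0 : (0 : Int) ≤ (n + 2 * 2 ^ e - 1) / (2 * 2 ^ e) := by
      apply Int.ediv_nonneg <;> omega
    have hcast : (((((n + 2 * 2 ^ e - 1) / (2 * 2 ^ e)).toNat : Nat)) : Int) =
        (n + 2 * 2 ^ e - 1) / (2 * 2 ^ e) := Int.toNat_of_nonneg hq0
    have hdm := Int.ediv_add_emod (n + 2 * 2 ^ e - 1) (2 * 2 ^ e)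
    have hr1 := Int.emod_nonneg (n + 2 * 2 ^ e - 1) (by omega : (2 * 2 ^ e : Int) ≠ 0)
    have hr2 := Int.emod_lt_of_pos (n + 2 * 2 ^ e - 1) (by omega : (0 : Int) < 2 * 2 ^ e)
    have hle : n ≤ 2 * 2 ^ e * (((n + 2 * 2 ^ e - 1) / (2 * 2 ^ e)).toNat : Int) := by
      rw [hcast]
      nlinarith [hdm, hr1, hr2]
    have hmin : min (2 * 2 ^ e * (((n + 2 * 2 ^ e - 1) / (2 * 2 ^ e)).toNat : Int)) n = n := by
      omega
    rw [hmin]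
  · rw [PySem.List.pyRange_one_eq_nil (by omega : n ≤ (0 : Int))]
    have : PySem.List.pyRange 0 n (2 * 2 ^ e) = [] := by
      rw [PySem.List.pyRange_of_pos 0 n (by positivity)]
      rw [if_neg (by omega : ¬ (0 : Int) < n)]
      simp
    rw [this]
    simp

-- B's result is the row table in filter form
lemma solve_alt_eq_map (n : Int) :
    solve_alt n = (List.range (Lof n)).map (fun r =>
      ((PySem.List.pyRange 0 n 1).filter
        (fun i => decide (PySem.Int.mod i ((2 : Int) ^ ((Lof n - 1 - r) + 1)) <
          (2 : Int) ^ (Lof n - 1 - r)))).map (· + 1)) := by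
  rw [solve_alt_eq, PySem.List.foldl_append_singleton_eq_map (rowOfB n (Lof n))]
  simp only [List.nil_append]
  apply List.map_congr_left
  intro r _
  exact rowOfB_eq n (Lof n) r

-- A's row is a filter-map
lemma rowA_eq_filter (n f h : Int) :
    rowA n f h =
      ((PySem.List.pyRange 0 n 1).filter (fun i => decide (PySem.Int.mod i f < h))).map (· + 1) := by
  unfold rowA
  generalize PySem.List.pyRange 0 n 1 = l
  suffices H : ∀ (l : List Int) (acc : List Int),
      l.foldl (fun r i => if PySem.Int.mod i f < h then r ++ [i + 1] else r) acc =
        acc ++ (l.filter (fun i => decide (PySem.Int.mod i f < h))).map (· + 1) by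
    simpa using H l []
  intro l
  induction l with
  | nil => intro acc; simp
  | cons x xs ih =>
      intro acc
      by_cases hp : PySem.Int.mod x f < h <;>
        simp [hp, ih, List.append_assoc]

-- AR n k: the rows A's second loop emits starting from f = 2^k
def AR (n : Int) : Nat → List (List Int)
  | 0 => []
  | k + 1 => rowA n (2 ^ (k + 1)) (2 ^ k) :: AR n k

lemma rowsA_one (n h : Int) : ∀ fuel, rowsA fuel n 1 h = [] := by
  intro fuel; cases fuel <;> simp [rowsA]

lemma pow_shift_right (k : Nat) : ((2 : Int) ^ (k + 1)) >>> (1 : Nat) = (2 : Int) ^ k := by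
  have h : ((2 : Int) ^ (k + 1)) = ((2 ^ (k + 1) : Nat) : Int) := by push_cast; ring
  rw [h, ← Int.natCast_shiftRight]
  have : (2 ^ (k + 1) : Nat) >>> 1 = 2 ^ k := by
    rw [Nat.shiftRight_eq_div_pow]
    have : (2 : Nat) ^ (k + 1) = 2 * 2 ^ k := by ring
    omega
  rw [this]
  push_cast; ring

lemma pow_succ_shift_right (k : Nat) : ((2 : Int) ^ (k + 1) + 1) >>> (1 : Nat) = (2 : Int) ^ k := by
  have h : ((2 : Int) ^ (k + 1) + 1) = ((2 ^ (k + 1) + 1 : Nat) : Int) := by push_cast; ring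
  rw [h, ← Int.natCast_shiftRight]
  have : (2 ^ (k + 1) + 1 : Nat) >>> 1 = 2 ^ k := by
    rw [Nat.shiftRight_eq_div_pow]
    have : (2 : Nat) ^ (k + 1) = 2 * 2 ^ k := by ring
    omega
  rw [this]
  push_cast; ring

lemma rows_eq (n : Int) :
    ∀ (fuel k : Nat) (h : Int), k ≤ fuel → h = ((2 : Int) ^ k) >>> (1 : Nat) →
      rowsA fuel n ((2 : Int) ^ k) h = AR n k := by
  intro fuel
  induction fuel with
  | zero =>
      intro k h hk _
      have : k = 0 := by omega
      subst this; rfl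
  | succ fuel ih =>
      intro k h hk hh
      cases k with
      | zero =>
          simp only [pow_zero] at *
          simp [rowsA, AR]
      | succ e =>
          have hf : (1 : Int) < 2 ^ (e + 1) := by
            have : (2 : Int) ^ 1 ≤ 2 ^ (e + 1) := by
              apply pow_le_pow_right₀ <;> omega
            simpa using lt_of_lt_of_le (by norm_num) this
          have hval : h = (2 : Int) ^ e := by rw [hh, pow_shift_right]
          subst hval
          simp only [rowsA, if_pos hf, AR]
          congr 1
          cases e with
          | zero => simpa using rowsA_one n _ fuel
          | succ d =>
              rw [pow_succ_shift_right d]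
              exact ih (d + 1) _ (by omega) (pow_shift_right d).symm

lemma grow_eq (n : Int) (L : Nat) (h1 : n ≤ 2 ^ L) (hmin : ∀ j : Nat, n ≤ 2 ^ j → L ≤ j) :
    ∀ (fuel j : Nat), j ≤ L → L ≤ j + fuel → growA fuel n ((2 : Int) ^ j) = 2 ^ L := by
  intro fuel
  induction fuel with
  | zero =>
      intro j hj hj2
      have : j = L := by omega
      subst this; rfl
  | succ fuel ih =>
      intro j hj hj2
      by_cases hf : (2 : Int) ^ j < n
      · have hjL : j < L := by
          by_contra hc
          have : L ≤ j := by omega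
          have : j = L := by omega
          subst this; omega
        have hsh : ((2 : Int) ^ j) <<< (1 : Nat) = (2 : Int) ^ (j + 1) := by
          rw [Int.shiftLeft_eq]; ring
        simp only [growA, if_pos hf, hsh]
        exact ih (j + 1) (by omega) (by omega)
      · have : L ≤ j := hmin j (by omega)
        have : j = L := by omega
        subst this
        simp [growA, hf]

lemma AR_eq_map (n : Int) : ∀ k, AR n k =
    (List.range k).map (fun r => rowA n ((2 : Int) ^ (k - r)) ((2 : Int) ^ (k - 1 - r))) := by
  intro k
  induction k with
  | zero => rfl
  | succ k ih =>
      rw [List.range_succ_eq_map, List.map_cons, List.map_map]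
      show rowA n (2 ^ (k + 1)) (2 ^ k) :: AR n k = _
      congr 1
      rw [ih]
      apply List.map_congr_left
      intro r hr
      have h1 : k + 1 - (r + 1) = k - r := by omega
      have h2 : k - (r + 1) = k - 1 - r := by omega
      simp [Function.comp, h1, h2]

lemma growA_stop (fuel : Nat) (n f : Int) (h : ¬ f < n) : growA fuel n f = f := by
  cases fuel <;> simp [growA, h]

lemma rowsA_stop (fuel : Nat) (n f h : Int) (hf : ¬ 1 < f) : rowsA fuel n f h = [] := by
  cases fuel <;> simp [rowsA, hf]

-- ===== VERDICT (by name: the statement is the Claim_ definition above) =====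
theorem solve_spec : Claim_equal_solve := by
  intro n hdom
  unfold Spec_solve
  simp only [Dom_solve, pvDomInt, decide_eq_true_eq] at hdom
  by_cases hn : 1 < n
  · set L := PySem.Int.bitLength (n - 1) with hLdef
    have hLof : Lof n = L := by rw [hLdef]; simp [Lof, hn]
    have hnn : ((n - 1).natAbs : Int) = n - 1 := Int.natAbs_of_nonneg (by omega)
    have h1 : n ≤ (2 : Int) ^ L := by
      have hf1 := PySem.Int.lt_two_pow_bitLength (n - 1)
      have hlt : ((n - 1).natAbs : Int) < ((2 ^ L : Nat) : Int) := by exact_mod_cast hf1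
      rw [hnn] at hlt
      have h2 : ((2 ^ L : Nat) : Int) = (2 : Int) ^ L := by push_cast; ring
      rw [h2] at hlt
      linarith
    have hmin : ∀ j : Nat, n ≤ (2 : Int) ^ j → L ≤ j := by
      intro j hj
      by_cases hL0 : L = 0
      · omega
      · have hne : n - 1 ≠ 0 := by omega
        have hb := PySem.Int.two_pow_bitLength_le (n - 1) hne
        have c2 : (2 : Nat) ^ (L - 1) < 2 ^ j := by
          have e1 : ((2 ^ (L - 1) : Nat) : Int) ≤ n - 1 := by
            rw [← hnn]; exact_mod_cast hb
          have h3 : ((2 ^ j : Nat) : Int) = (2 : Int) ^ j := by push_cast; ring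
          have e2 : n ≤ ((2 ^ j : Nat) : Int) := by rw [h3]; exact hj
          have : ((2 ^ (L - 1) : Nat) : Int) < ((2 ^ j : Nat) : Int) := by linarith
          exact_mod_cast this
        have := (Nat.pow_lt_pow_iff_right (by norm_num : 1 < 2)).mp c2
        omega
    have hL31 : L ≤ 31 := hmin 31 (by norm_num; exact hdom.2)
    have hgrow : growA 64 n 1 = (2 : Int) ^ L := by
      have := grow_eq n L h1 hmin 64 0 (by omega) (by omega)
      simpa using this
    have hrows : solve n = AR n L := by
      show rowsA 64 n (growA 64 n 1) (growA 64 n 1 >>> (1 : Nat)) = AR n L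
      rw [hgrow]
      exact rows_eq n 64 L _ (by omega) rfl
    rw [hrows, solve_alt_eq_map, hLof, AR_eq_map]
    apply List.map_congr_left
    intro r hr
    have hrL : r < L := List.mem_range.mp hr
    rw [rowA_eq_filter]
    rw [show L - r = (L - 1 - r) + 1 by omega]
  · have hs : solve n = [] := by
      show rowsA 64 n (growA 64 n 1) (growA 64 n 1 >>> (1 : Nat)) = []
      rw [growA_stop 64 n 1 (by omega)]
      exact rowsA_stop 64 n 1 _ (by norm_num)
    have hL0 : Lof n = 0 := by simp [Lof, hn]
    have hsa : solve_alt n = [] := by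
      rw [solve_alt_eq, hL0]
      rfl
    rw [hs, hsa]
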